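-- pv_equiv track=rewrite | github.com/josenobrec/BCC_Univem | Trabalho Python/av04.py | dms
-- ===== SOURCE A (Python) =====
-- def dms(num1, num2):
--     if num1 < 10 and num2 < 10:
--         return num1 + num2
--     else:
--         if num1 >= 10 and num2 >= 10:
--             return dms(num1//10, num2//10)
--         elif num2 >= 10 and num1 < 10:
--             return dms(num1, num2//10)
--         else:
--             return dms(num2, num1//10)
-- ===== SOURCE B (Python) =====
-- def dms(num1, num2):
--     while num1 >= 10:
--         num1 //= 10
--     while num2 >= 10:
--         num2 //= 10
--     return num1 + num2
-- ===== Notes on version B (the rewrite author's own statement) =====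
-- stated objective: simpler
-- what changed: Replaces the four-branch self-recursion (which also swaps its arguments in one branch) with two independent iterative digit-stripping loops followed by a single addition.
import Mathlib
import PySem

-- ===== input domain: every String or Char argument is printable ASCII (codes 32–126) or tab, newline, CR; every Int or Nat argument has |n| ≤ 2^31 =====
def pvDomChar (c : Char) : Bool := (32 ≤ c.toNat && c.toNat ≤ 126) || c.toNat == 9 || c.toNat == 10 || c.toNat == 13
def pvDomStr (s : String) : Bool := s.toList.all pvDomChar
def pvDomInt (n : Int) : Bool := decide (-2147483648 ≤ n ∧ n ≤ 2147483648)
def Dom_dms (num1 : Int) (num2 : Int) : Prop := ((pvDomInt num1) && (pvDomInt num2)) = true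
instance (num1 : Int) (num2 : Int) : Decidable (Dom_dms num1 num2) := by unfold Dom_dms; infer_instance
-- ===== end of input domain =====

-- B replaces A's four-branch argument-swapping recursion with two independent digit-stripping loops; objective: simpler.

-- termination helper for both ports: n // 10 strictly shrinks a number ≥ 10
theorem pvFloordiv10_lt (n : Int) (h : 10 ≤ n) :
    (PySem.Int.floordiv n 10).toNat < n.toNat := by
  have h1 : PySem.Int.floordiv n 10 = n / 10 :=
    PySem.Int.floordiv_eq_ediv_of_pos (by omega)
  have hd := Int.ediv_add_emod n 10
  have hm1 : 0 ≤ n % 10 := Int.emod_nonneg n (by omega)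
  have hm2 : n % 10 < 10 := Int.emod_lt_of_pos n (by omega)
  omega

-- ===== PORT A =====
def dms (num1 : Int) (num2 : Int) : Int :=
  if num1 < 10 ∧ num2 < 10 then
    num1 + num2
  else
    if 10 ≤ num1 ∧ 10 ≤ num2 then
      dms (PySem.Int.floordiv num1 10) (PySem.Int.floordiv num2 10)
    else if 10 ≤ num2 ∧ num1 < 10 then
      dms num1 (PySem.Int.floordiv num2 10)
    else
      dms num2 (PySem.Int.floordiv num1 10)
termination_by num1.toNat + num2.toNat
decreasing_by
  · have := pvFloordiv10_lt num1 (by omega)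
    have := pvFloordiv10_lt num2 (by omega)
    omega
  · have := pvFloordiv10_lt num2 (by omega)
    omega
  · have := pvFloordiv10_lt num1 (by omega)
    omega

-- ===== PORT B =====
-- while num >= 10: num //= 10
def pvStrip (n : Int) : Int :=
  if 10 ≤ n then pvStrip (PySem.Int.floordiv n 10) else n
termination_by n.toNat
decreasing_by
  exact pvFloordiv10_lt n (by omega)

def dms_alt (num1 : Int) (num2 : Int) : Int :=
  pvStrip num1 + pvStrip num2

-- ===== PRECONDITION & SPEC =====
def Spec_dms (num1 : Int) (num2 : Int) (out : Int) : Prop := out = dms_alt num1 num2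
instance (num1 : Int) (num2 : Int) (out : Int) : Decidable (Spec_dms num1 num2 out) := by unfold Spec_dms; infer_instance

-- ===== CLAIM (what is proved, stated in full; the proofs are below) =====
def Claim_equal_dms : Prop := ∀ (num1 : Int) (num2 : Int), Dom_dms num1 num2 → Spec_dms num1 num2 (dms num1 num2)

-- ===== LEMMAS AND PROOFS =====
theorem pvStrip_small (n : Int) (h : n < 10) : pvStrip n = n := by
  rw [pvStrip]; simp [not_le.mpr h]

theorem pvStrip_big (n : Int) (h : 10 ≤ n) :
    pvStrip n = pvStrip (PySem.Int.floordiv n 10) := by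
  rw [pvStrip]; simp [h]

theorem dms_eq_strip (num1 num2 : Int) : dms num1 num2 = pvStrip num1 + pvStrip num2 := by
  rw [dms]
  split_ifs with h1 h2 h3
  · rw [pvStrip_small num1 h1.1, pvStrip_small num2 h1.2]
  · rw [dms_eq_strip, pvStrip_big num1 h2.1, pvStrip_big num2 h2.2]
  · rw [dms_eq_strip, pvStrip_big num2 h3.1]
  · rw [dms_eq_strip, pvStrip_big num1 (by omega)]
    ring
termination_by num1.toNat + num2.toNat
decreasing_by
  · have := pvFloordiv10_lt num1 (by omega)
    have := pvFloordiv10_lt num2 (by omega)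
    omega
  · have := pvFloordiv10_lt num2 (by omega)
    omega
  · have := pvFloordiv10_lt num1 (by omega)
    omega

-- ===== VERDICT (by name: the statement is the Claim_ definition above) =====
theorem dms_spec : Claim_equal_dms := by
  intro num1 num2 _
  unfold Spec_dms dms_alt
  exact dms_eq_strip num1 num2
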